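-- pv_equiv track=rewrite | github.com/kajpeterson/Boogle | boogle_diylib.py | letters_func
-- ===== SOURCE A (Python) =====
-- def letters_func(word):
--     letters = []
--     skip = 0
--     for char in word:
--         if skip == 1:
--             skip = 0
--             continue
--         if skip == 0:
--             if char == "Q":
--                 letters.append('QU')
--                 skip = 1
--             else:
--                 letters.append(char)
--     return letters
-- ===== SOURCE B (Python) =====
-- import re
--
-- def letters_func(word):
--     return ['QU' if tok[0] == 'Q' else tok
--             for tok in re.findall(r'Q.?|.', word, re.S)]
-- ===== Notes on version B (the rewrite author's own statement) =====
-- stated objective: idiomatic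
-- what changed: Replaced the explicit skip-flag loop with a regex tokenization (re.findall(r'Q.?|.', word, re.S)) followed by a comprehension mapping Q-led tokens to 'QU'.
import Mathlib
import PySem

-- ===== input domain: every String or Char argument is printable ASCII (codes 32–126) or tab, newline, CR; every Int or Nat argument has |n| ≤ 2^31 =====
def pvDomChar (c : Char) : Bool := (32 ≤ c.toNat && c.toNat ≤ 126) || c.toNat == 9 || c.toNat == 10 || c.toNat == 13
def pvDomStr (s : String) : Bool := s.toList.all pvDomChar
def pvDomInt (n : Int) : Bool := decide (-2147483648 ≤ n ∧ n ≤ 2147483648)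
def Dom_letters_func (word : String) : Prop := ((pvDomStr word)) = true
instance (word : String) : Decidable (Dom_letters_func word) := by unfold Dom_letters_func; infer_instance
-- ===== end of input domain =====

-- B replaces A's skip-flag loop by a regex tokenization ('Q' grabs its following character) mapped to 'QU'; same linear cost, more idiomatic.

-- ===== PORT A =====
-- A's for-loop over the characters, carrying (letters, skip) as the state.
def letters_func (word : String) : List String :=
  (word.toList.foldl (fun (st : List String × Int) char =>
      if st.2 = 1 then (st.1, 0)
      else if st.2 = 0 then
        (if char = 'Q' then (st.1 ++ ["QU"], 1) else (st.1 ++ [String.ofList [char]], 0))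
      else st) ([], 0)).1

-- ===== PORT B =====
-- Tokenizer implementing re.findall(r'Q.?|.', word, re.S): a 'Q' takes the next
-- character with it (or stands alone at end), any other character is its own token.
def pvTokens : List Char → List String
  | [] => []
  | 'Q' :: c :: rest => String.ofList ['Q', c] :: pvTokens rest
  | ['Q'] => ["Q"]
  | c :: rest => String.ofList [c] :: pvTokens rest

def letters_func_alt (word : String) : List String :=
  (pvTokens word.toList).map (fun tok => if tok.toList.head? = some 'Q' then "QU" else tok)

-- ===== PRECONDITION & SPEC =====
def Spec_letters_func (word : String) (out : List String) : Prop := out = letters_func_alt word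
instance (word : String) (out : List String) : Decidable (Spec_letters_func word out) := by unfold Spec_letters_func; infer_instance

-- ===== CLAIM (what is proved, stated in full; the proofs are below) =====
def Claim_equal_letters_func : Prop := ∀ (word : String), Dom_letters_func word → Spec_letters_func word (letters_func word)

-- ===== LEMMAS AND PROOFS =====
theorem pv_fold_eq (l : List Char) : ∀ (acc : List String),
    (l.foldl (fun (st : List String × Int) char =>
      if st.2 = 1 then (st.1, 0)
      else if st.2 = 0 then
        (if char = 'Q' then (st.1 ++ ["QU"], 1) else (st.1 ++ [String.ofList [char]], 0))
      else st) (acc, 0)).1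
      = acc ++ (pvTokens l).map (fun tok => if tok.toList.head? = some 'Q' then "QU" else tok) := by
  induction l using pvTokens.induct with
  | case1 => simp [pvTokens]
  | case2 c rest ih =>
      intro acc
      simp [List.foldl, pvTokens, ih]
  | case3 =>
      intro acc
      simp [List.foldl, pvTokens]
  | case4 c rest h1 h2 ih =>
      intro acc
      have hc : c ≠ 'Q' := by
        intro h
        rcases rest with _ | ⟨d, rest'⟩
        · exact h2 h rfl
        · exact h1 d rest' h rfl
      have ht : pvTokens (c :: rest) = String.ofList [c] :: pvTokens rest := by
        rcases rest with _ | ⟨d, rest'⟩ <;> simp [pvTokens]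
      simp only [List.foldl, ht]
      norm_num [hc]
      rw [ih (acc ++ [String.ofList [c]])]
      simp

-- ===== VERDICT (by name: the statement is the Claim_ definition above) =====
theorem letters_func_spec : Claim_equal_letters_func := by
  intro word _
  unfold Spec_letters_func letters_func letters_func_alt
  simpa using pv_fold_eq word.toList []
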